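-- pv_equiv track=rewrite | github.com/thumbe12856/competitive-programming | code-jam/2020/Round1-A/1.py | check_prefix
-- ===== SOURCE A (Python) =====
-- def check_prefix(max_prefix, pattern):
-- 	length = min(len(max_prefix), len(pattern))
-- 	ret = True
-- 	for i in range(length):
-- 		if pattern[i] == "*":
-- 			break
-- 		elif max_prefix[i] != pattern[i]:
-- 			ret = False
-- 			break
-- 	return ret
-- ===== SOURCE B (Python) =====
-- def check_prefix(max_prefix, pattern):
--     length = min(len(max_prefix), len(pattern))
--     p = pattern[:length]
--     idx = p.find('*')
--     if idx == -1:
--         idx = length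
--     return max_prefix[:idx] == p[:idx]
-- ===== Notes on version B (the rewrite author's own statement) =====
-- stated objective: simpler
-- what changed: Replaces the char-by-char early-exit loop with a locate-then-compare decomposition: find the first '*' in pattern[:min length] with str.find and compare the slices before that cut point.
import Mathlib
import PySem

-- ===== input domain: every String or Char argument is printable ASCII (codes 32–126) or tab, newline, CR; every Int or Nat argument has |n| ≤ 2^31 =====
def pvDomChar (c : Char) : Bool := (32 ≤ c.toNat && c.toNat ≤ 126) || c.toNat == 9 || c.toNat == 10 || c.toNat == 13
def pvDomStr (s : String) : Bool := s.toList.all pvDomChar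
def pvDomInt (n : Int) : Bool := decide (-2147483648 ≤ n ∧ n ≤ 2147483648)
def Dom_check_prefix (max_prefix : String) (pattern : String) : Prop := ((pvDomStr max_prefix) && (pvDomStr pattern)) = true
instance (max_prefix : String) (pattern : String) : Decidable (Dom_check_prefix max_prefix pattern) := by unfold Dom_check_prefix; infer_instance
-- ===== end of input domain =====

-- B replaces A's char-by-char early-exit loop by find-the-'*'-cut-point then slice comparison (simpler decomposition).

-- ===== PORT A =====
-- A's loop over i in range(min(len, len)) becomes the obvious simultaneous recursion
-- over the two character lists (which stops at the shorter one, = range(min)).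
def checkPrefixLoop : List Char → List Char → Bool
  | m :: ms, p :: ps =>
      if p = '*' then true
      else if m ≠ p then false
      else checkPrefixLoop ms ps
  | _, _ => true

def check_prefix (max_prefix : String) (pattern : String) : Bool :=
  checkPrefixLoop max_prefix.toList pattern.toList

-- ===== PORT B =====
def check_prefix_alt (max_prefix : String) (pattern : String) : Bool :=
  let m := max_prefix.toList
  let p0 := pattern.toList
  let length : Nat := min m.length p0.length
  let p := PySem.List.slice p0 none (some (length : Int))   -- pattern[:length]
  let idx : Int := PySem.Chars.find p ['*']                 -- p.find('*')
  let idx : Int := if idx = -1 then (length : Int) else idx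
  decide (PySem.List.slice m none (some idx) = PySem.List.slice p none (some idx))

-- ===== PRECONDITION & SPEC =====
def Spec_check_prefix (max_prefix : String) (pattern : String) (out : Bool) : Prop := out = check_prefix_alt max_prefix pattern
instance (max_prefix : String) (pattern : String) (out : Bool) : Decidable (Spec_check_prefix max_prefix pattern out) := by unfold Spec_check_prefix; infer_instance

-- ===== CLAIM (what is proved, stated in full; the proofs are below) =====
def Claim_equal_check_prefix : Prop := ∀ (max_prefix : String) (pattern : String), Dom_check_prefix max_prefix pattern → Spec_check_prefix max_prefix pattern (check_prefix max_prefix pattern)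

-- ===== LEMMAS AND PROOFS =====

-- named pieces of check_prefix_alt's let-chain (proof helpers only)
def pvLen (mp pat : String) : Nat := min mp.toList.length pat.toList.length
def pvP (mp pat : String) : List Char := PySem.List.slice pat.toList none (some ((pvLen mp pat : Nat) : Int))
def pvF (mp pat : String) : Int := PySem.Chars.find (pvP mp pat) ['*']
def pvIdx (mp pat : String) : Int := if pvF mp pat = -1 then ((pvLen mp pat : Nat) : Int) else pvF mp pat

theorem check_prefix_alt_def (mp pat : String) :
    check_prefix_alt mp pat =
      decide (PySem.List.slice mp.toList none (some (pvIdx mp pat)) =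
              PySem.List.slice (pvP mp pat) none (some (pvIdx mp pat))) := rfl

-- A's loop equals "compare the first c characters" when no '*' occurs before index c
-- and c is either the min length or the position of the first '*'.
theorem checkPrefixLoop_eq_take (c : Nat) : ∀ (m p : List Char),
    c ≤ min m.length p.length →
    (∀ i < c, p[i]? ≠ some '*') →
    (c = min m.length p.length ∨ p[c]? = some '*') →
    checkPrefixLoop m p = decide (m.take c = p.take c) := by
  induction c with
  | zero =>
      intro m p _ _ hend
      simp only [List.take_zero, decide_true]
      match m, p with
      | [], _ => rfl
      | _ :: _, [] => rfl
      | m0 :: ms, p0 :: ps =>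
          rcases hend with h | h
          · simp at h
          · simp at h
            simp [checkPrefixLoop, h]
  | succ c ih =>
      intro m p hc hstar hend
      match m, p with
      | [], _ => simp at hc
      | _ :: _, [] => simp at hc
      | m0 :: ms, p0 :: ps =>
          have hp0 : p0 ≠ '*' := by
            have := hstar 0 (Nat.succ_pos c); simpa using this
          by_cases hm : m0 = p0
          · have : checkPrefixLoop (m0 :: ms) (p0 :: ps) = checkPrefixLoop ms ps := by
              simp [checkPrefixLoop, hp0, hm]
            rw [this, ih ms ps]
            · simp [List.take_succ_cons, hm]
            · simp at hc; omega
            · intro i hi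
              have := hstar (i + 1) (by omega)
              simpa using this
            · rcases hend with h | h
              · left; simp at h ⊢; omega
              · right; simpa using h
          · simp only [checkPrefixLoop, hp0, if_false, ne_eq, hm, not_false_iff, if_true,
              List.take_succ_cons]
            simp [hm]

theorem check_prefix_spec : Claim_equal_check_prefix := by
  unfold Claim_equal_check_prefix Spec_check_prefix
  intro mp pat _
  rw [check_prefix_alt_def]
  unfold check_prefix pvIdx pvF pvP pvLen
  set m := mp.toList with hm
  set p0 := pat.toList with hp0
  set L : Nat := min m.length p0.length with hL
  rw [PySem.List.slice_to_natCast p0 L]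
  set f : Int := PySem.Chars.find (p0.take L) ['*'] with hf
  by_cases hneg : f = -1
  · -- no '*' in pattern[:L]
    have hnostar : ∀ i < L, p0[i]? ≠ some '*' := by
      have hni : ¬ ['*'] <:+: p0.take L := (PySem.Chars.find_eq_neg_one_iff _ _).mp (hf ▸ hneg)
      intro i hi hsome
      apply hni
      have hlt : i < p0.length := lt_of_lt_of_le hi (by omega)
      have hgi : p0[i] = '*' := by simp [List.getElem?_eq_getElem hlt] at hsome; exact hsome
      have hmem : '*' ∈ p0.take L := by
        refine List.mem_take_iff_getElem.mpr ⟨i, by omega, ?_⟩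
        simpa [hgi]
      exact (List.singleton_infix_iff '*' (p0.take L)).mpr hmem
    rw [if_pos hneg]
    rw [checkPrefixLoop_eq_take L m p0 (le_refl _) hnostar (Or.inl rfl)]
    rw [PySem.List.slice_to_natCast m L, PySem.List.slice_to_natCast (p0.take L) L]
    simp [List.take_take]
  · -- first '*' at index f
    have h0 : 0 ≤ f := by
      have := PySem.Chars.neg_one_le_find (p0.take L) ['*']
      rw [← hf] at this; omega
    obtain ⟨hpre, hfirst⟩ := PySem.Chars.find_spec (s := p0.take L) (sub := ['*']) (hf ▸ h0)
    set c : Nat := f.toNat with hcdef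
    have hlenTake : (p0.take L).length = L := by simp [hL]
    have hflen : c < L := by
      rcases Nat.lt_or_ge c L with h | h
      · exact h
      · exfalso
        have hdrop : (p0.take L).drop c = [] := List.drop_eq_nil_of_le (by omega)
        rw [hdrop] at hpre
        exact absurd (List.prefix_nil.mp hpre) (by simp)
    have hget : (p0.take L)[c]? = some '*' := by
      rcases hpre with ⟨t, ht⟩
      have := congrArg (fun l => l[0]?) ht
      simpa [List.getElem?_drop] using this.symm
    have hstar_c : p0[c]? = some '*' := by
      rwa [List.getElem?_take_of_lt hflen] at hget
    have hnostar : ∀ i < c, p0[i]? ≠ some '*' := by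
      intro i hi hsome
      apply hfirst i hi
      have hthis : (p0.take L)[i]? = some '*' := by
        rw [List.getElem?_take_of_lt (by omega)]; exact hsome
      have hlt : i < (p0.take L).length := by omega
      have hgi : (p0.take L)[i] = '*' := by
        have := List.getElem?_eq_getElem hlt
        rw [this] at hthis; injection hthis
      refine ⟨(p0.take L).drop (i+1), ?_⟩
      rw [List.drop_eq_getElem_cons hlt, hgi]
      rfl
    rw [if_neg hneg]
    rw [checkPrefixLoop_eq_take c m p0 (by omega) hnostar (Or.inr hstar_c)]
    have hfc : f = (c : Int) := by omega
    rw [hfc, PySem.List.slice_to_natCast m c, PySem.List.slice_to_natCast (p0.take L) c]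
    simp only [List.take_take]
    rw [min_eq_left hflen.le]
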